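-- pv_equiv track=rewrite | github.com/elann1/Gender-Gap-Tracking-in-News-Media---English-and-Turkish-Implementations | scripts/scripts-english-nlp/gender_ratio_top_100.py | expand_partial_names
-- ===== SOURCE A (Python) =====
-- def expand_partial_names(name_list):
--     updated_names = []
--
--     for i, name in enumerate(name_list):
--         replacement = name
--         for other in name_list:
--             if name != other and name in other:
--                 # Check name is NOT the first word of the other
--                 if not other.startswith(name):
--                     replacement = other
--                     break
--         updated_names.append(replacement)
--
--     return updated_names
-- ===== SOURCE B (Python) =====
-- def expand_partial_names(name_list):
--     # Outer pass over candidate replacements; each candidate fills every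
--     # still-empty slot whose name it contains as a non-prefix substring.
--     slots = [None] * len(name_list)
--     for other in name_list:
--         slots = [other if s is None and n != other and n in other and not other.startswith(n) else s
--                  for s, n in zip(slots, name_list)]
--     return [n if s is None else s for s, n in zip(slots, name_list)]
-- ===== Notes on version B (the rewrite author's own statement) =====
-- stated objective: alternative
-- what changed: Inverted the loop nesting: instead of a per-name inner scan with break, B makes one pass over candidate replacements, filling each still-empty slot with the first candidate that contains its name as a non-prefix substring.
import Mathlib
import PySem

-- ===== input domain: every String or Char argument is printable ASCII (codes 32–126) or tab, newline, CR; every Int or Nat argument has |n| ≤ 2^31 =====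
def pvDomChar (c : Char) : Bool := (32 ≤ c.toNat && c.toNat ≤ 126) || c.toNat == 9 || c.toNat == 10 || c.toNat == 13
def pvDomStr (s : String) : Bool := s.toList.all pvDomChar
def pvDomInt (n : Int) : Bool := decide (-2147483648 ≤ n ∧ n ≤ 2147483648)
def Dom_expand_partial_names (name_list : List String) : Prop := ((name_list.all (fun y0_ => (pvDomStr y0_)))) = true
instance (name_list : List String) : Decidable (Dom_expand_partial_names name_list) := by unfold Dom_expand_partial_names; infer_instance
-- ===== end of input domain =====

-- B inverts the loop nesting (one pass over candidate replacements filling still-empty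
-- slots) instead of A's per-name inner scan with break; same cost, alternative structure.

-- the match condition both programs test: name != other and name in other and not other.startswith(name)
def pvPred (name other : String) : Bool :=
  decide (name ≠ other) && PySem.Str.isIn name other && ! PySem.Str.startswith other name

-- ===== PORT A =====
-- A's inner loop: replacement = name; for other in name_list: if cond: replacement = other; break
def pvFindRepl (name : String) : List String → String
  | [] => name
  | other :: rest => if pvPred name other then other else pvFindRepl name rest

def expand_partial_names (name_list : List String) : List String :=
  name_list.map (fun name => pvFindRepl name name_list)

-- ===== PORT B =====
-- one candidate pass: fill every still-empty slot whose name matches this candidate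
def pvStep (names : List String) (slots : List (Option String)) (other : String) :
    List (Option String) :=
  (slots.zip names).map (fun p =>
    if p.1 = none ∧ pvPred p.2 other then some other else p.1)

def expand_partial_names_alt (name_list : List String) : List String :=
  let slots := name_list.foldl (pvStep name_list) (List.replicate name_list.length none)
  (slots.zip name_list).map (fun p => match p.1 with | none => p.2 | some s => s)

-- ===== PRECONDITION & SPEC =====
def Spec_expand_partial_names (name_list : List String) (out : List String) : Prop := out = expand_partial_names_alt name_list
instance (name_list : List String) (out : List String) : Decidable (Spec_expand_partial_names name_list out) := by unfold Spec_expand_partial_names; infer_instance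

-- ===== CLAIM (what is proved, stated in full; the proofs are below) =====
def Claim_equal_expand_partial_names : Prop := ∀ (name_list : List String), Dom_expand_partial_names name_list → Spec_expand_partial_names name_list (expand_partial_names name_list)

-- ===== LEMMAS AND PROOFS =====

-- the per-slot evolution of one slot under the candidate pass
def pvSlot (s : Option String) (name : String) (others : List String) : Option String :=
  others.foldl (fun acc o => if acc = none ∧ pvPred name o then some o else acc) s

theorem pvSlot_some (x : String) (name : String) (others : List String) :
    pvSlot (some x) name others = some x := by
  induction others with
  | nil => rfl
  | cons o rest ih => simpa [pvSlot] using ih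

theorem pv_zip_map_self {α β : Type} (g : α → β) (l : List α) :
    (l.map g).zip l = l.map (fun n => (g n, n)) := by
  induction l with
  | nil => rfl
  | cons a t ih => simp [ih]

-- stepping then zipping with names = mapping the step over the zipped pairs
theorem pvStep_zip (names : List String) (slots : List (Option String)) (o : String)
    (h : slots.length = names.length) :
    (pvStep names slots o).zip names
      = (slots.zip names).map (fun p =>
          ((if p.1 = none ∧ pvPred p.2 o then some o else p.1), p.2)) := by
  induction slots generalizing names with
  | nil => cases names <;> simp at h ⊢
  | cons s t ih =>
    cases names with
    | nil => simp at h
    | cons n ns =>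
      simp only [pvStep, List.zip_cons_cons, List.map_cons] at *
      exact congrArg _ (ih ns (by simp at h; omega))

-- B's fold acts pointwise: each slot evolves independently by pvSlot
theorem pvStep_foldl (others : List String) (names : List String)
    (slots : List (Option String)) (h : slots.length = names.length) :
    others.foldl (pvStep names) slots
      = (slots.zip names).map (fun p => pvSlot p.1 p.2 others) := by
  induction others generalizing slots with
  | nil =>
    simp [pvSlot]
    exact (List.map_fst_zip (by omega)).symm
  | cons o rest ih =>
    rw [List.foldl_cons, ih]
    · rw [pvStep_zip names slots o h, List.map_map]
      apply List.map_congr_left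
      intro p _
      simp [pvSlot]
    · unfold pvStep
      simp [List.length_zip, h]

-- one fresh slot evolves to A's first-match search
theorem pvSlot_none (name : String) (others : List String) :
    (match pvSlot none name others with | none => name | some s => s)
      = pvFindRepl name others := by
  induction others with
  | nil => rfl
  | cons o rest ih =>
    by_cases hp : pvPred name o = true
    · simp only [pvSlot, List.foldl_cons] at *
      rw [if_pos (by simp [hp])]
      have h2 := pvSlot_some o name rest
      simp only [pvSlot] at h2
      simp [h2, pvFindRepl, hp]
    · simp only [pvSlot, List.foldl_cons, pvFindRepl, hp, Bool.not_eq_true] at *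
      simpa [hp] using ih

theorem pv_alt_eq (name_list : List String) :
    expand_partial_names_alt name_list = expand_partial_names name_list := by
  show (((name_list.foldl (pvStep name_list)
        (List.replicate name_list.length none)).zip name_list).map
      (fun p => match p.1 with | none => p.2 | some s => s))
    = expand_partial_names name_list
  rw [pvStep_foldl _ _ _ (by simp)]
  have hz : (List.replicate name_list.length (none : Option String)).zip name_list
      = name_list.map (fun n => ((none : Option String), n)) := by
    induction name_list with
    | nil => rfl
    | cons a t iht => simpa [List.replicate_succ] using iht
  rw [hz, List.map_map, pv_zip_map_self, List.map_map]
  apply List.map_congr_left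
  intro n _
  simpa using pvSlot_none n name_list

-- ===== VERDICT (by name: the statement is the Claim_ definition above) =====
theorem expand_partial_names_spec : Claim_equal_expand_partial_names := by
  intro name_list _
  unfold Spec_expand_partial_names
  exact (pv_alt_eq name_list).symm
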